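-- pv_equiv track=rewrite | github.com/confeiniao/25egeeg | st/ts.py | filter_domains
-- ===== SOURCE A (Python) =====
-- def filter_domains(lines):
--     lines.sort(key=len)
--     unique_lines = [lines[0]]
--     for i in range(1, len(lines)):
--         if not any(('.' + line) in lines[i] for line in unique_lines):
--             unique_lines.append(lines[i])
--     unique_lines = sorted(unique_lines)
--     return unique_lines
-- ===== SOURCE B (Python) =====
-- def filter_domains(lines):
--     lines.sort(key=len)
--     kept = []
--     seen = set()
--     lens = set()
--     for cand in lines:
--         drop = any(
--             ch == '.' and any(cand[j + 1:j + 1 + l] in seen for l in lens)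
--             for j, ch in enumerate(cand)
--         )
--         if not drop:
--             kept.append(cand)
--             seen.add(cand)
--             lens.add(len(cand))
--     return sorted(kept)
-- ===== Notes on version B (the rewrite author's own statement) =====
-- stated objective: faster
-- what changed: Instead of testing every kept domain as a '.'+domain substring of each candidate (rescanning the kept list), B keeps the kept domains in a hash set plus the set of their lengths and, for each dot position in the candidate, looks up the following slice of each kept length in the set.
import Mathlib
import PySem

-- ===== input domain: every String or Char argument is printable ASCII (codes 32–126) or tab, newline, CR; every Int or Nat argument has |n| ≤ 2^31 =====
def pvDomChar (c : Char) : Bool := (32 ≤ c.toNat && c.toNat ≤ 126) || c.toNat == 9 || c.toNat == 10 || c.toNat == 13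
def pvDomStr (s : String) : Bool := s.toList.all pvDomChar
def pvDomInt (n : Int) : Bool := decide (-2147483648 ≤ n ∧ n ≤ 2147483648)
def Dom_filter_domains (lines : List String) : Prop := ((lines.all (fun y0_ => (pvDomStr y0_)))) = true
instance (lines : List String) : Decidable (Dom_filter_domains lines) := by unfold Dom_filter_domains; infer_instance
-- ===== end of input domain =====

-- B replaces A's rescan of the whole kept list per candidate (substring test for each '.'+kept)
-- by a hash set of kept domains plus the set of their lengths, looked up at each dot position
-- of the candidate; objective: faster. Both A and B sort the argument list in place in Python
-- (same side effect); the equivalence proved here is about the return value.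

-- ===== PORT A =====
def filter_domains (lines : List String) : List String :=
  -- lines.sort(key=len)
  let ls := PySem.List.sorted lines (fun s => PySem.Str.len s) false
  -- unique_lines = [lines[0]]   (pyGetD under Pre_: lines ≠ [])
  let u0 : List String := [PySem.List.pyGetD ls 0 ""]
  -- for i in range(1, len(lines)): if not any(('.' + line) in lines[i] …): append lines[i]
  let u := (PySem.List.pyRange 1 (ls.length : Int) 1).foldl
    (fun u i =>
      if u.any (fun line => PySem.Str.isIn (String.ofList ('.' :: line.toList)) (PySem.List.pyGetD ls i "")) then u
      else u ++ [PySem.List.pyGetD ls i ""]) u0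
  -- return sorted(unique_lines)
  PySem.List.sorted u (fun x => x) false

-- ===== PORT B =====
def filter_domains_alt (lines : List String) : List String :=
  -- lines.sort(key=len)
  let ls := PySem.List.sorted lines (fun s => PySem.Str.len s) false
  -- kept = []; seen = set(); lens = set(); for cand in lines: …
  let st := ls.foldl
    (fun (st : List String × PySem.Set String × PySem.Set Int) c =>
      -- drop = any(ch == '.' and any(cand[j+1:j+1+l] in seen for l in lens) for j, ch in enumerate(cand))
      let drop := (PySem.List.enumerate c.toList 0).any (fun p =>
        p.2 == '.' && st.2.2.any (fun l =>
          st.2.1.contains (PySem.Str.slice c (some (p.1 + 1)) (some (p.1 + 1 + l)))))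
      -- if not drop: kept.append(cand); seen.add(cand); lens.add(len(cand))
      if drop then st
      else (st.1 ++ [c], st.2.1.add c, st.2.2.add (PySem.Str.len c)))
    ([], PySem.Set.empty, PySem.Set.empty)
  -- return sorted(kept)
  PySem.List.sorted st.1 (fun x => x) false

-- ===== PRECONDITION & SPEC =====
-- Pre_ excludes only the empty list, on which A raises IndexError at lines[0].
def Pre_filter_domains (lines : List String) : Prop := lines ≠ []
instance (lines : List String) : Decidable (Pre_filter_domains lines) := by unfold Pre_filter_domains; infer_instance
def pvWitness_filter_domains : List String := (["a.example.com", "example.com", "other.net"])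

def Spec_filter_domains (lines : List String) (out : List String) : Prop := out = filter_domains_alt lines
instance (lines : List String) (out : List String) : Decidable (Spec_filter_domains lines out) := by unfold Spec_filter_domains; infer_instance

-- ===== CLAIM (what is proved, stated in full; the proofs are below) =====
def Claim_equal_filter_domains : Prop := ∀ (lines : List String), Dom_filter_domains lines → Pre_filter_domains lines → Spec_filter_domains lines (filter_domains lines)

-- ===== LEMMAS AND PROOFS =====

-- the slice cand[j+1 : j+1+n] of B, on the Chars side
theorem pv_slice_toList (c : String) (j n : Nat) :
    (PySem.Str.slice c (some ((0:Int) + ↑j + 1)) (some ((0:Int) + ↑j + 1 + ↑n))).toList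
    = (c.toList.drop (j+1)).take n := by
  rw [PySem.Str.toList_slice, PySem.Chars.slice_eq_listSlice,
    show ((0:Int) + ↑j + 1) = ((j+1 : Nat) : Int) by push_cast; ring,
    show (((j+1 : Nat) : Int) + ↑n) = (((j+1)+n : Nat) : Int) by push_cast; ring,
    PySem.List.slice_natCast]
  congr 1; omega

-- A's membership test for one candidate equals B's dot-position hash-set test,
-- when seen = set(kept) and lens = set of kept lengths.
theorem pv_check_eq (u : List String) (c : String) :
    u.any (fun line => PySem.Str.isIn (String.ofList ('.' :: line.toList)) c)
    = (PySem.List.enumerate c.toList 0).any (fun p =>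
        p.2 == '.' && (PySem.Set.ofList (u.map (fun s => PySem.Str.len s))).any (fun l =>
          (PySem.Set.ofList u).contains (PySem.Str.slice c (some (p.1 + 1)) (some (p.1 + 1 + l))))) := by
  rw [Bool.eq_iff_iff]
  simp only [List.any_eq_true, PySem.Str.isIn_eq, String.toList_ofList,
    PySem.List.mem_enumerate_iff, PySem.Set.contains_iff, PySem.Set.mem_ofList, List.mem_map,
    Bool.and_eq_true, beq_iff_eq, ← PySem.Chars.exists_prefix_drop_iff_isIn]
  constructor
  · rintro ⟨k, hk, j, hpre⟩
    have hlen : j < c.toList.length := by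
      by_contra h
      rw [List.drop_eq_nil_of_le (by omega), List.prefix_nil] at hpre
      exact List.cons_ne_nil _ _ hpre
    rw [List.drop_eq_getElem_cons hlen, List.cons_prefix_cons] at hpre
    obtain ⟨hdot, htail⟩ := hpre
    refine ⟨((0:Int) + ↑j, c.toList[j]), ⟨j, hlen, rfl⟩, hdot.symm,
      PySem.Str.len k, ⟨k, hk, rfl⟩, ?_⟩
    dsimp only
    have hs : PySem.Str.slice c (some ((0:Int) + ↑j + 1)) (some ((0:Int) + ↑j + 1 + PySem.Str.len k)) = k := by
      rw [← String.toList_inj, PySem.Str.len_eq, pv_slice_toList c j k.toList.length]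
      exact (List.prefix_iff_eq_take.mp htail).symm
    rw [hs]; exact hk
  · rintro ⟨p, ⟨j, hlen, rfl⟩, hdot, l, ⟨a, _, rfl⟩, hmem⟩
    dsimp only at hdot hmem
    refine ⟨_, hmem, j, ?_⟩
    rw [List.drop_eq_getElem_cons hlen, List.cons_prefix_cons]
    refine ⟨hdot.symm, ?_⟩
    rw [PySem.Str.len_eq, pv_slice_toList c j a.toList.length]
    exact List.take_prefix _ _

-- the loop invariant: B's state is (kept, set(kept), set of kept lengths)
theorem pv_fold_inv (rest : List String) (u : List String) :
    rest.foldl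
      (fun (st : List String × PySem.Set String × PySem.Set Int) c =>
        let drop := (PySem.List.enumerate c.toList 0).any (fun p =>
          p.2 == '.' && st.2.2.any (fun l =>
            st.2.1.contains (PySem.Str.slice c (some (p.1 + 1)) (some (p.1 + 1 + l)))))
        if drop then st
        else (st.1 ++ [c], st.2.1.add c, st.2.2.add (PySem.Str.len c)))
      (u, PySem.Set.ofList u, PySem.Set.ofList (u.map (fun s => PySem.Str.len s)))
    = (let u' := rest.foldl
        (fun u c => if u.any (fun line => PySem.Str.isIn (String.ofList ('.' :: line.toList)) c) then u else u ++ [c]) u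
       (u', PySem.Set.ofList u', PySem.Set.ofList (u'.map (fun s => PySem.Str.len s)))) := by
  induction rest generalizing u with
  | nil => rfl
  | cons c rest ih =>
    simp only [List.foldl_cons]
    rw [← pv_check_eq u c]
    by_cases h : u.any (fun line => PySem.Str.isIn (String.ofList ('.' :: line.toList)) c) = true
    · rw [if_pos h, if_pos h]
      exact ih u
    · rw [if_neg h, if_neg h]
      have h1 : (PySem.Set.ofList u).add c = PySem.Set.ofList (u ++ [c]) :=
        (PySem.Set.ofList_append_singleton u c).symm
      have h2 : (PySem.Set.ofList (u.map (fun s => PySem.Str.len s))).add (PySem.Str.len c)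
          = PySem.Set.ofList ((u ++ [c]).map (fun s => PySem.Str.len s)) := by
        rw [List.map_append, List.map_singleton, PySem.Set.ofList_append_singleton]
      rw [h1, h2]
      exact ih (u ++ [c])

-- ===== VERDICT (by name: the statement is the Claim_ definition above) =====
theorem filter_domains_spec : Claim_equal_filter_domains := by
  intro lines _ hpre
  unfold Spec_filter_domains filter_domains filter_domains_alt
  have hne : PySem.List.sorted lines (fun s => PySem.Str.len s) false ≠ [] := by
    intro h; exact hpre ((PySem.List.sorted_eq_nil_iff _ _ _).mp h)
  obtain ⟨c0, rest, hcr⟩ := List.exists_cons_of_ne_nil hne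
  rw [hcr]
  simp only []
  simp only [PySem.List.foldl_pyRange_pyGetD' (c0 :: rest) ""
    (fun u c => if u.any (fun line => PySem.Str.isIn (String.ofList ('.' :: line.toList)) c) then u else u ++ [c])
    [PySem.List.pyGetD (c0 :: rest) 0 ""] (by norm_num : (0:Int) ≤ 1)]
  simp only [List.foldl_cons, PySem.List.pyGetD_zero_cons]
  rw [show Int.toNat 1 = 1 from rfl, List.drop_succ_cons, List.drop_zero]
  rw [if_neg (by simp [PySem.Set.empty])]
  rw [show (([] ++ [c0], PySem.Set.empty.add c0, PySem.Set.empty.add (PySem.Str.len c0)) :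
      List String × PySem.Set String × PySem.Set Int)
    = ([c0], PySem.Set.ofList [c0], PySem.Set.ofList ([c0].map (fun s => PySem.Str.len s))) from rfl,
    pv_fold_inv rest [c0]]
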